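-- pv_equiv track=rewrite | github.com/dduniverse/Algorithm | 프로그래머스/lv0/120835. 진료 순서 정하기/진료 순서 정하기.py | solution
-- ===== SOURCE A (Python) =====
-- def solution(emergency):
--     answer = [0] * len(emergency)
--
--     sort = sorted(emergency, reverse=True)
--
--     for i in range(len(emergency)):
--         for j in range(len(sort)):
--             if emergency[i] == sort[j]:
--                 answer[i] = j + 1
--
--     return answer
-- ===== SOURCE B (Python) =====
-- def solution(emergency):
--     # rank of v = number of elements >= v (no sorting needed: in the
--     # descending order, v's last occurrence sits right after everything >= it)
--     return [sum(1 for x in emergency if x >= v) for v in emergency]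
-- ===== Notes on version B (the rewrite author's own statement) =====
-- stated objective: simpler
-- what changed: Dropped the sort and the search through it entirely: B uses the order-statistic identity rank(v) = #{x : x >= v}, computed by a direct counting comprehension (one line, no sorted copy, no index bookkeeping); duplicates get the same count A's last-match scan yields.
import Mathlib
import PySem

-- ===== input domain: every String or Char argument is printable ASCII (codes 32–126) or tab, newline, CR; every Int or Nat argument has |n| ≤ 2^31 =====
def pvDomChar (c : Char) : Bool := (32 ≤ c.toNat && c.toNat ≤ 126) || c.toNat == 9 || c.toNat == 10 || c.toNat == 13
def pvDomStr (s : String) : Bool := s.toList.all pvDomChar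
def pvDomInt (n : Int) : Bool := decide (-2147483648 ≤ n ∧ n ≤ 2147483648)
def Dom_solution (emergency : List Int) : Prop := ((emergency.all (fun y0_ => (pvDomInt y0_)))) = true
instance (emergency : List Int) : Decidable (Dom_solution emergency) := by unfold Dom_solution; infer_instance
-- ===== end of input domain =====

-- B drops the sort and search entirely: rank(v) = #{x : x >= v}, computed by a counting pass (simpler; same asymptotic cost).

-- ===== PORT A =====
-- literal transliteration: answer = [0]*len; sort = sorted(emergency, reverse=True);
-- nested index loops, answer[i] = j+1 on every match (last match wins).
def solution (emergency : List Int) : List Int :=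
  let answer := PySem.List.pyRepeat [(0 : Int)] (PySem.List.len emergency)
  let sort := PySem.List.sorted emergency (fun x => x) true
  (PySem.List.pyRange 0 (PySem.List.len emergency) 1).foldl (fun answer i =>
    (PySem.List.pyRange 0 (PySem.List.len sort) 1).foldl (fun answer j =>
      if PySem.List.pyGetD emergency i 0 = PySem.List.pyGetD sort j 0 then
        PySem.List.pySetD answer i (j + 1)
      else answer) answer) answer

-- ===== PORT B =====
-- return [sum(1 for x in emergency if x >= v) for v in emergency]
def solution_alt (emergency : List Int) : List Int :=
  emergency.map (fun v =>
    emergency.foldl (fun acc x => if v ≤ x then acc + 1 else acc) (0 : Int))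

-- ===== PRECONDITION & SPEC =====
def Spec_solution (emergency : List Int) (out : List Int) : Prop := out = solution_alt emergency
instance (emergency : List Int) (out : List Int) : Decidable (Spec_solution emergency out) := by unfold Spec_solution; infer_instance

-- ===== CLAIM (what is proved, stated in full; the proofs are below) =====
def Claim_equal_solution : Prop := ∀ (emergency : List Int), Dom_solution emergency → Spec_solution emergency (solution emergency)

-- ===== LEMMAS AND PROOFS =====

/-- The rank of `v` read off a scan of the pairs `(j, x)`: last match's `j + 1`. -/
def pvScan (l : List (Int × Int)) (v : Int) (a : Int) : Int :=
  l.foldl (fun a p => if v = p.2 then p.1 + 1 else a) a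

theorem pvScan_no_match (l : List (Int × Int)) (v : Int) :
    v ∉ l.map Prod.snd → ∀ a, pvScan l v a = a := by
  induction l with
  | nil => intro _ _; rfl
  | cons p t ih =>
    intro h a
    simp only [List.map_cons, List.mem_cons, not_or] at h
    simp only [pvScan, List.foldl_cons, if_neg h.1]
    exact ih h.2 a

/-- A's inner write loop over matching pairs is one `set` of the last match. -/
theorem pv_setfold (l : List (Int × Int)) (v : Int) (i : Int) (hi : 0 ≤ i) :
    v ∈ l.map Prod.snd → ∀ (ans : List Int) (a : Int),
    l.foldl (fun ans p => if v = p.2 then PySem.List.pySetD ans i (p.1 + 1) else ans) ans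
      = ans.set i.toNat (pvScan l v a) := by
  induction l with
  | nil => intro h; simp at h
  | cons p t ih =>
    intro h ans a
    simp only [List.foldl_cons, pvScan]
    by_cases hv : v = p.2
    · rw [if_pos hv]
      by_cases hm : v ∈ t.map Prod.snd
      · rw [ih hm _ (p.1 + 1), PySem.List.pySetD_of_nonneg _ _ hi, List.set_set]
        simp [pvScan, if_pos hv]
      · have h1 : t.foldl (fun ans p => if v = p.2 then PySem.List.pySetD ans i (p.1 + 1) else ans)
            (PySem.List.pySetD ans i (p.1 + 1)) = PySem.List.pySetD ans i (p.1 + 1) := by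
          clear ih h
          generalize PySem.List.pySetD ans i (p.1 + 1) = b
          induction t generalizing b with
          | nil => rfl
          | cons q u ihu =>
            simp only [List.map_cons, List.mem_cons, not_or] at hm
            simp only [List.foldl_cons, if_neg hm.1]
            exact ihu hm.2 _
        have h2 : pvScan t v (if v = p.2 then p.1 + 1 else a) = p.1 + 1 := by
          rw [pvScan_no_match t v hm, if_pos hv]
        simp only [pvScan] at h2
        rw [h1, h2, PySem.List.pySetD_of_nonneg _ _ hi]
    · rw [if_neg hv]
      simp only [List.map_cons, List.mem_cons] at h
      have hm : v ∈ t.map Prod.snd := h.resolve_left hv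
      rw [ih hm ans a, if_neg hv]
      simp [pvScan]

/-- The sorted list, abbreviated. -/
def pvSort (emergency : List Int) : List Int :=
  PySem.List.sorted emergency (fun x => x) true

/-- The pairs A effectively scans. -/
def pvPairs (emergency : List Int) : List (Int × Int) :=
  PySem.List.enumerate (pvSort emergency) 0

theorem pv_mem_pairs (emergency : List Int) (v : Int) (hv : v ∈ emergency) :
    v ∈ (pvPairs emergency).map Prod.snd := by
  rw [pvPairs, PySem.List.map_snd_enumerate]
  exact ((PySem.List.sorted_perm emergency (fun x => x) true).mem_iff).2 hv

/-- Writing `f xs[i]` at index i over all indices of a zero list is `xs.map f`. -/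
theorem pv_fill (f : Int → Int) :
    ∀ (xs : List Int) (pre : List Int),
    (PySem.List.enumerate xs (pre.length : Int)).foldl
        (fun ans p => ans.set p.1.toNat (f p.2)) (pre ++ List.replicate xs.length 0)
      = pre ++ xs.map f := by
  intro xs
  induction xs with
  | nil => simp [PySem.List.enumerate_nil]
  | cons x t ih =>
    intro pre
    rw [PySem.List.enumerate_cons]
    simp only [List.foldl_cons, List.length_cons, List.replicate_succ]
    have hset : (pre ++ 0 :: List.replicate t.length 0).set (pre.length : Int).toNat (f x)
        = (pre ++ [f x]) ++ List.replicate t.length 0 := by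
      simp [List.append_assoc]
    rw [hset]
    have hl : ((pre.length : Int) + 1) = ((pre ++ [f x]).length : Int) := by
      simp
    rw [hl, ih (pre ++ [f x])]
    simp

/-- A computes the map of the scan result. -/
theorem pv_solution_eq (emergency : List Int) :
    solution emergency = emergency.map (fun v => pvScan (pvPairs emergency) v 0) := by
  unfold solution
  simp only []
  have hrep : PySem.List.pyRepeat [(0 : Int)] (PySem.List.len emergency)
      = List.replicate emergency.length 0 := by
    rw [PySem.List.pyRepeat_singleton]
    simp [PySem.List.len_eq]
  rw [hrep]
  rw [show PySem.List.sorted emergency (fun x => x) true = pvSort emergency from rfl]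
  have hpairs : pvPairs emergency
      = (PySem.List.pyRange 0 (PySem.List.len (pvSort emergency)) 1).map
          (fun j => (j, PySem.List.pyGetD (pvSort emergency) j 0)) := by
    rw [pvPairs]
    exact PySem.List.enumerate_eq_map_pyRange (pvSort emergency) 0
  have hinner : ∀ (e : Int) (ans : List Int) (i : Int), 0 ≤ i → e ∈ emergency →
      (PySem.List.pyRange 0 (PySem.List.len (pvSort emergency)) 1).foldl (fun answer j =>
        if e = PySem.List.pyGetD (pvSort emergency) j 0 then
          PySem.List.pySetD answer i (j + 1)
        else answer) ans
      = ans.set i.toNat (pvScan (pvPairs emergency) e 0) := by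
    intro e ans i hi he
    have hmem := pv_mem_pairs emergency e he
    rw [← pv_setfold (pvPairs emergency) e i hi hmem ans 0, hpairs, List.foldl_map]
  have houter : (PySem.List.pyRange 0 (PySem.List.len emergency) 1).foldl (fun answer i =>
      (PySem.List.pyRange 0 (PySem.List.len (pvSort emergency)) 1).foldl (fun answer j =>
        if PySem.List.pyGetD emergency i 0 = PySem.List.pyGetD (pvSort emergency) j 0 then
          PySem.List.pySetD answer i (j + 1)
        else answer) answer) (List.replicate emergency.length 0)
      = (PySem.List.pyRange 0 (PySem.List.len emergency) 1).foldl (fun answer i =>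
          answer.set i.toNat (pvScan (pvPairs emergency) (PySem.List.pyGetD emergency i 0) 0))
        (List.replicate emergency.length 0) := by
    apply PySem.List.foldl_congr_mem
    intro ans i hi
    have h0 : 0 ≤ i ∧ i < PySem.List.len emergency := (PySem.List.mem_pyRange_one).1 hi
    have hmem : PySem.List.pyGetD emergency i 0 ∈ emergency := by
      apply PySem.List.pyGetD_mem
      constructor <;> simp [PySem.List.len_eq] at h0 ⊢ <;> omega
    exact hinner _ ans i h0.1 hmem
  rw [houter]
  have henum := PySem.List.enumerate_eq_map_pyRange emergency 0
  have hfill := pv_fill (fun v => pvScan (pvPairs emergency) v 0) emergency []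
  simp only [List.length_nil, Nat.cast_zero, List.nil_append] at hfill
  rw [henum, List.foldl_map] at hfill
  exact hfill

/-- On a descending list, the last-match rank is the count of elements ≥ v. -/
theorem pvScan_desc (l : List Int) (v : Int) :
    l.Pairwise (fun a b => b ≤ a) → v ∈ l → ∀ (s a : Int),
    pvScan (PySem.List.enumerate l s) v a = s + (l.countP (fun x => decide (v ≤ x)) : Int) := by
  induction l with
  | nil => intro _ h; simp at h
  | cons x t ih =>
    intro hp hv s a
    rcases List.pairwise_cons.1 hp with ⟨hx, hpt⟩
    rw [PySem.List.enumerate_cons]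
    simp only [pvScan, List.foldl_cons]
    by_cases hm : v ∈ t
    · have hvx : v ≤ x := hx v hm
      have := ih hpt hm (s + 1) (if v = x then s + 1 else a)
      simp only [pvScan] at this
      rw [this, List.countP_cons, if_pos (by simp [hvx])]
      push_cast
      ring
    · have hvx : v = x := (List.mem_cons.1 hv).resolve_right hm
      have hnm : v ∉ (PySem.List.enumerate t (s + 1)).map Prod.snd := by
        rw [PySem.List.map_snd_enumerate]; exact hm
      have := pvScan_no_match _ v hnm (if v = x then s + 1 else a)
      simp only [pvScan] at this
      rw [this, if_pos hvx]
      have ht0 : t.countP (fun x => decide (v ≤ x)) = 0 := by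
        rw [List.countP_eq_zero]
        intro y hy
        have hle : y ≤ x := hx y hy
        by_contra hc
        simp only [decide_eq_true_eq] at hc
        have : y = v := le_antisymm (hvx ▸ hle) hc
        exact hm (this ▸ hy)
      rw [List.countP_cons, if_pos (by simp [hvx]), ht0]
      push_cast
      ring

/-- The scan rank equals the count over the original list. -/
theorem pv_scan_eq_count (emergency : List Int) (v : Int) (hv : v ∈ emergency) :
    pvScan (pvPairs emergency) v 0
      = (emergency.countP (fun x => decide (v ≤ x)) : Int) := by
  have hp : (pvSort emergency).Pairwise (fun a b => b ≤ a) :=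
    PySem.List.sorted_pairwise_rev emergency (fun x => x)
  have hm : v ∈ pvSort emergency :=
    ((PySem.List.sorted_perm emergency (fun x => x) true).mem_iff).2 hv
  have := pvScan_desc (pvSort emergency) v hp hm 0 0
  rw [pvPairs, this, zero_add]
  simp only [pvSort]
  rw [(PySem.List.sorted_perm emergency (fun x => x) true).countP_eq]

-- ===== VERDICT (by name: the statement is the Claim_ definition above) =====
theorem solution_spec : Claim_equal_solution := by
  intro emergency _
  show solution emergency = solution_alt emergency
  rw [pv_solution_eq]
  unfold solution_alt
  apply List.map_congr_left
  intro v hv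
  rw [pv_scan_eq_count emergency v hv, PySem.List.foldl_ite_add_one, zero_add]
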